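-- pv_equiv track=rewrite | github.com/Darlig/md_asr_keyword_joint | hanlp_make_datalist.py | detach_item
-- ===== SOURCE A (Python) =====
-- def detach_item(items, word2id, phone2id):
--     max_wrd_id = max(list(word2id.values())) if len(word2id) > 0 else 2
--     max_phn_id = max(list(phone2id.values())) if len(phone2id) > 0 else 2
--     word_seq = []
--     phn_seq = []
--     for item in items:
--         word, init, final = item
--         if word not in word2id:
--             max_wrd_id += 1
--             word2id[word] = max_wrd_id
--         if init not in phone2id:
--             max_phn_id += 1
--             phone2id[init] = max_phn_id
--         if final not in phone2id:
--             max_phn_id += 1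
--             phone2id[final] = max_phn_id
--         word_seq.append(word2id[word])
--         phn_seq.append([phone2id[init], phone2id[final]])
--     return word_seq, phn_seq, word2id, phone2id
-- ===== SOURCE B (Python) =====
-- def detach_item(items, word2id, phone2id):
--     base_w = max(list(word2id.values())) if len(word2id) > 0 else 2
--     base_p = max(list(phone2id.values())) if len(phone2id) > 0 else 2
--     # batch phase: the fresh keys, in first-occurrence order (word stream; init/final stream)
--     new_words = [w for w in dict.fromkeys(w for w, _, _ in items) if w not in word2id]
--     new_phones = [p for p in dict.fromkeys(p for _, i, f in items for p in (i, f))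
--                   if p not in phone2id]
--     word2id.update({w: base_w + 1 + i for i, w in enumerate(new_words)})
--     phone2id.update({p: base_p + 1 + i for i, p in enumerate(new_phones)})
--     # pure lookups
--     word_seq = [word2id[w] for w, _, _ in items]
--     phn_seq = [[phone2id[i], phone2id[f]] for _, i, f in items]
--     return word_seq, phn_seq, word2id, phone2id
-- ===== Notes on version B (the rewrite author's own statement) =====
-- stated objective: alternative
-- what changed: A's fused per-item loop of conditional dict inserts interleaved with lookups is replaced by a batch pipeline: ordered-dedup the word stream and the flattened init/final stream, filter out already-known keys, assign consecutive ids to the fresh keys in one enumerate-based dict update, then produce the sequences by pure lookups.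
import Mathlib
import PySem

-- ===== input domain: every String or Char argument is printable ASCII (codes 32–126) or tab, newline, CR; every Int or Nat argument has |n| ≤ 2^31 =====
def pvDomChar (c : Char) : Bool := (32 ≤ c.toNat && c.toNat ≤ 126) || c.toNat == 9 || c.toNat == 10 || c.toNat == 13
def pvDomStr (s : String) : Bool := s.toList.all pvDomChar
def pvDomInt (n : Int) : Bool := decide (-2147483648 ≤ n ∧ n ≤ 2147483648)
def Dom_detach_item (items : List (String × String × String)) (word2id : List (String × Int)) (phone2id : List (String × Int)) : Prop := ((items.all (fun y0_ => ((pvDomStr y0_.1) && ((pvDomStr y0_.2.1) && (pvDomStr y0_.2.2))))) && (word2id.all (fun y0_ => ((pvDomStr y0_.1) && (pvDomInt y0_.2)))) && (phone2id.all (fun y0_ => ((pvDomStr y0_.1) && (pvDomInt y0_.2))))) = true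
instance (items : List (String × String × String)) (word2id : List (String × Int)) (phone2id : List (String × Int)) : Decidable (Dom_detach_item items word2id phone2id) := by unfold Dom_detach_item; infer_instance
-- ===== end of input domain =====

-- B replaces A's fused per-item conditional-insert loop by a batch computation: dedup the word and
-- init/final key streams, filter out known keys, assign consecutive ids by enumeration in one dict
-- update, then map pure lookups (alternative decomposition, same cost); both mutate the dicts in
-- Python — the equivalence proved here is about the returned four-tuple (B performs the same mutation).


-- ===== PORT A =====
-- `max(list(d.values())) if len(d) > 0 else 2` (identical line in A and B; getD's default is unused: values ≠ [])
def detachInit (d : PySem.Dict String Int) : Int :=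
  if d.size > 0 then (PySem.List.max? d.values (fun x => x)).getD 2 else 2

-- A's single step: Python's `if k not in d: m += 1; d[k] = m`
def detachStep (m : Int) (d : PySem.Dict String Int) (k : String) : Int × PySem.Dict String Int :=
  if d.contains k = false then (m + 1, d.insert k (m + 1)) else (m, d)

-- A's fused loop: per item update the dicts (word → init → final) and append the lookups at once
def detachLoopA : List (String × String × String) → Int → Int → List Int → List (List Int) →
    PySem.Dict String Int → PySem.Dict String Int →
    List Int × List (List Int) × (List (String × Int)) × (List (String × Int))
  | [], _, _, ws, ps, w, p => (ws, ps, w.items, p.items)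
  | (word, init, final) :: rest, mW, mP, ws, ps, w, p =>
    let s1 := detachStep mW w word
    let s2 := detachStep mP p init
    let s3 := detachStep s2.1 s2.2 final
    detachLoopA rest s1.1 s3.1 (ws ++ [s1.2.getD word 0])
      (ps ++ [[s3.2.getD init 0, s3.2.getD final 0]]) s1.2 s3.2

def detach_item (items : List (String × String × String)) (word2id : List (String × Int)) (phone2id : List (String × Int)) : List Int × List (List Int) × (List (String × Int)) × (List (String × Int)) :=
  let w := PySem.Dict.ofList word2id
  let p := PySem.Dict.ofList phone2id
  detachLoopA items (detachInit w) (detachInit p) [] [] w p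

-- ===== PORT B =====
-- B: fresh keys = dedup of the key stream minus known keys; one batch update with enumerated ids; pure lookups
def detach_item_alt (items : List (String × String × String)) (word2id : List (String × Int)) (phone2id : List (String × Int)) : List Int × List (List Int) × (List (String × Int)) × (List (String × Int)) :=
  let w0 := PySem.Dict.ofList word2id
  let p0 := PySem.Dict.ofList phone2id
  let baseW := detachInit w0
  let baseP := detachInit p0
  let newW := (PySem.List.dedup (items.map (fun it => it.1))).filter (fun k => !(w0.contains k))
  let newP := (PySem.List.dedup (items.flatMap (fun it => [it.2.1, it.2.2]))).filter (fun k => !(p0.contains k))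
  let w1 := w0.update ((PySem.List.enumerate newW 0).map (fun q => (q.2, baseW + 1 + q.1)))
  let p1 := p0.update ((PySem.List.enumerate newP 0).map (fun q => (q.2, baseP + 1 + q.1)))
  (items.map (fun it => w1.getD it.1 0),
   items.map (fun it => [p1.getD it.2.1 0, p1.getD it.2.2 0]),
   w1.items, p1.items)

-- ===== PRECONDITION & SPEC =====
def Spec_detach_item (items : List (String × String × String)) (word2id : List (String × Int)) (phone2id : List (String × Int)) (out : List Int × List (List Int) × (List (String × Int)) × (List (String × Int))) : Prop := out = detach_item_alt items word2id phone2id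
instance (items : List (String × String × String)) (word2id : List (String × Int)) (phone2id : List (String × Int)) (out : List Int × List (List Int) × (List (String × Int)) × (List (String × Int))) : Decidable (Spec_detach_item items word2id phone2id out) := by unfold Spec_detach_item; infer_instance

-- ===== CLAIM (what is proved, stated in full; the proofs are below) =====
def Claim_equal_detach_item : Prop := ∀ (items : List (String × String × String)) (word2id : List (String × Int)) (phone2id : List (String × Int)), Dom_detach_item items word2id phone2id → Spec_detach_item items word2id phone2id (detach_item items word2id phone2id)

-- ===== LEMMAS AND PROOFS =====

-- proof-side view of A's dict evolution on one key stream
def stepLoop : List String → Int → PySem.Dict String Int → PySem.Dict String Int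
  | [], _, d => d
  | k :: ks, m, d => stepLoop ks (detachStep m d k).1 (detachStep m d k).2

-- proof-side view of B's batch update: insert each key with the next id
def assignIds : PySem.Dict String Int → Int → List String → PySem.Dict String Int
  | d, _, [] => d
  | d, m, k :: ks => assignIds (d.insert k (m + 1)) (m + 1) ks

-- a binding present before a step is still present (steps only insert absent keys)
theorem get?_detachStep (m : Int) (d : PySem.Dict String Int) (k j : String) (v : Int)
    (h : d.get? j = some v) : (detachStep m d k).2.get? j = some v := by
  unfold detachStep
  split
  · next hc =>
    have hne : j ≠ k := by
      intro hjk; subst hjk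
      rw [PySem.Dict.contains_eq_isSome_get?, h] at hc
      simp at hc
    exact (PySem.Dict.get?_insert_of_ne _ _ hne).trans h
  · exact h

-- after a step on k, the key k is bound
theorem isSome_detachStep (m : Int) (d : PySem.Dict String Int) (k : String) :
    ((detachStep m d k).2.get? k).isSome := by
  unfold detachStep
  split
  · next => simp [PySem.Dict.get?_insert_self]
  · next hc =>
    rw [PySem.Dict.contains_eq_isSome_get?] at hc
    exact Option.isSome_iff_ne_none.mpr (by simpa using hc)

-- stepLoop never disturbs an existing binding
theorem get?_stepLoop : ∀ (ks : List String) (m : Int) (d : PySem.Dict String Int)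
    (j : String) (v : Int), d.get? j = some v → (stepLoop ks m d).get? j = some v
  | [], _, _, _, _, h => h
  | k :: ks, m, d, j, v, h => by
    simp only [stepLoop]
    exact get?_stepLoop ks _ _ j v (get?_detachStep m d k j v h)

-- A's fused loop = stepLoop on the word stream and on the init/final stream, plus final lookups
theorem loopA_eq : ∀ (items : List (String × String × String)) (mW mP : Int)
    (ws : List Int) (ps : List (List Int)) (w p : PySem.Dict String Int),
    detachLoopA items mW mP ws ps w p =
      (ws ++ items.map (fun it => (stepLoop (items.map (fun it => it.1)) mW w).getD it.1 0),
       ps ++ items.map (fun it =>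
         [(stepLoop (items.flatMap (fun it => [it.2.1, it.2.2])) mP p).getD it.2.1 0,
          (stepLoop (items.flatMap (fun it => [it.2.1, it.2.2])) mP p).getD it.2.2 0]),
       (stepLoop (items.map (fun it => it.1)) mW w).items,
       (stepLoop (items.flatMap (fun it => [it.2.1, it.2.2])) mP p).items)
  | [], mW, mP, ws, ps, w, p => by simp [detachLoopA, stepLoop]
  | (word, init, final) :: rest, mW, mP, ws, ps, w, p => by
    simp only [detachLoopA, List.map_cons, List.flatMap_cons, List.cons_append, List.nil_append,
      stepLoop]
    set s1 := detachStep mW w word with hs1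
    set s2 := detachStep mP p init with hs2
    set s3 := detachStep s2.1 s2.2 final with hs3
    obtain ⟨vw, hvw⟩ := Option.isSome_iff_exists.mp (isSome_detachStep mW w word)
    obtain ⟨vf, hvf⟩ := Option.isSome_iff_exists.mp (isSome_detachStep s2.1 s2.2 final)
    obtain ⟨vi, hvi0⟩ := Option.isSome_iff_exists.mp (isSome_detachStep mP p init)
    rw [← hs1] at hvw
    rw [← hs3] at hvf
    have hvi : s3.2.get? init = some vi := get?_detachStep s2.1 s2.2 final init vi hvi0
    rw [loopA_eq rest s1.1 s3.1 _ _ s1.2 s3.2]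
    have hw' := get?_stepLoop (rest.map (fun it => it.1)) s1.1 s1.2 word vw hvw
    have hi' := get?_stepLoop (rest.flatMap (fun it => [it.2.1, it.2.2])) s3.1 s3.2 init vi hvi
    have hf' := get?_stepLoop (rest.flatMap (fun it => [it.2.1, it.2.2])) s3.1 s3.2 final vf hvf
    simp [PySem.Dict.getD_eq_get?_getD, hvw, hvi, hvf, hw', hi', hf']

-- discarding k then filtering out d's keys = filtering out (k together with d's keys)
theorem filter_discard (l : List String) (k : String) (d : PySem.Dict String Int) :
    (PySem.Set.discard l k).filter (fun x => !(d.contains x)) =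
      l.filter (fun x => !(x == k || d.contains x)) := by
  simp only [PySem.Set.discard, List.filter_filter]
  exact List.filter_congr (fun x _ => by simp [Bool.not_or, Bool.and_comm])

-- A's conditional-insert scan = unconditional insertion of the fresh deduplicated keys
theorem stepLoop_eq_assign : ∀ (ks : List String) (m : Int) (d : PySem.Dict String Int),
    stepLoop ks m d =
      assignIds d m ((PySem.List.dedup ks).filter (fun x => !(d.contains x)))
  | [], _, _ => rfl
  | k :: ks, m, d => by
    by_cases hc : d.contains k = true
    · have hd : detachStep m d k = (m, d) := by simp [detachStep, hc]
      have hfil : (PySem.List.dedup (k :: ks)).filter (fun x => !(d.contains x)) =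
          (PySem.List.dedup ks).filter (fun x => !(d.contains x)) := by
        rw [PySem.List.dedup_eq_ofList, PySem.Set.ofList_cons, ← PySem.List.dedup_eq_ofList]
        rw [List.filter_cons, if_neg (by simp [hc])]
        rw [filter_discard]
        exact List.filter_congr (fun x _ => by
          cases h : x == k
          · simp
          · have hx : x = k := by simpa using h
            simp [hx, hc])
      simp only [stepLoop, hd]
      rw [hfil]
      exact stepLoop_eq_assign ks m d
    · have hc' : d.contains k = false := by simpa using hc
      have hd : detachStep m d k = (m + 1, d.insert k (m + 1)) := by simp [detachStep, hc']
      have hfil : (PySem.List.dedup (k :: ks)).filter (fun x => !(d.contains x)) =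
          k :: (PySem.List.dedup ks).filter (fun x => !((d.insert k (m + 1)).contains x)) := by
        rw [PySem.List.dedup_eq_ofList, PySem.Set.ofList_cons, ← PySem.List.dedup_eq_ofList]
        rw [List.filter_cons, if_pos (by simp [hc'])]
        rw [filter_discard]
        congr 1
        exact List.filter_congr (fun x _ => by rw [PySem.Dict.contains_insert])
      simp only [stepLoop, hd]
      rw [hfil]
      simp only [assignIds]
      exact stepLoop_eq_assign ks (m + 1) (d.insert k (m + 1))

-- B's enumerated batch update = sequential insertion with a running id (start index generalized)
theorem update_enum_eq_assign : ∀ (ks : List String) (d : PySem.Dict String Int) (m s : Int),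
    d.update ((PySem.List.enumerate ks s).map (fun q => (q.2, m + 1 + (q.1 - s)))) =
      assignIds d m ks
  | [], _, _, _ => rfl
  | k :: ks, d, m, s => by
    simp only [PySem.List.enumerate_cons, List.map_cons, PySem.Dict.update, List.foldl_cons,
      assignIds]
    have harith : m + 1 + (s - s) = m + 1 := by ring
    rw [show ((PySem.List.enumerate ks (s + 1)).map (fun q => (q.2, m + 1 + (q.1 - s)))) =
        ((PySem.List.enumerate ks (s + 1)).map (fun q => (q.2, (m + 1) + 1 + (q.1 - (s + 1))))) by
      exact List.map_congr_left (fun q _ => by simp only [Prod.mk.injEq, true_and]; ring)]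
    rw [harith]
    exact update_enum_eq_assign ks (d.insert k (m + 1)) (m + 1) (s + 1)

-- ===== VERDICT (by name: the statement is the Claim_ definition above) =====
theorem detach_item_spec : Claim_equal_detach_item := by
  intro items word2id phone2id _
  unfold Spec_detach_item detach_item detach_item_alt
  rw [loopA_eq]
  have hW := update_enum_eq_assign
    ((PySem.List.dedup (items.map (fun it => it.1))).filter
      (fun x => !((PySem.Dict.ofList word2id).contains x)))
    (PySem.Dict.ofList word2id) (detachInit (PySem.Dict.ofList word2id)) 0
  have hP := update_enum_eq_assign
    ((PySem.List.dedup (items.flatMap (fun it => [it.2.1, it.2.2]))).filter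
      (fun x => !((PySem.Dict.ofList phone2id).contains x)))
    (PySem.Dict.ofList phone2id) (detachInit (PySem.Dict.ofList phone2id)) 0
  simp only [sub_zero] at hW hP
  simp only [hW, hP, ← stepLoop_eq_assign]
  simp
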